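-- pv_equiv track=rewrite | github.com/S1LV3RJ1NX/CodingNinjas-DSA | 01 - Arrays/13 - xor_queries.py | xorQuery
-- ===== SOURCE A (Python) =====
-- def xorQuery(queries):
--
--     ans = []
--     xor_val = 0
--
--     for q_type, q_value in queries:
--         if q_type == 1:
--             # append element with running xor itself
--             ans.append(q_value^xor_val)
--         else:
--             xor_val ^= q_value
--
--     for i in range(len(ans)):
--         ans[i] ^= xor_val
--     return ans
-- ===== SOURCE B (Python) =====
-- def xorQuery(queries):
--     # Backward index scan: walk i from the last query down to 0, keeping n2 =
--     # XOR of the type-2 values already seen (i.e. those occurring AFTER index i).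
--     # A stored answer equals its value XORed with that suffix accumulator.
--     out = []
--     n2 = 0
--     i = len(queries) - 1
--     while i >= 0:
--         t, v = queries[i]
--         if t == 1:
--             out.append(v ^ n2)
--         else:
--             n2 ^= v
--         i -= 1
--     out.reverse()
--     return out
-- ===== Notes on version B (the rewrite author's own statement) =====
-- stated objective: alternative
-- what changed: Replaces A's forward pass plus a second deferred final-XOR adjustment loop over the answers with a single backward index scan (while-loop from the last query down) that maintains a suffix XOR accumulator and reverses the collected answers once.
import Mathlib
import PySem

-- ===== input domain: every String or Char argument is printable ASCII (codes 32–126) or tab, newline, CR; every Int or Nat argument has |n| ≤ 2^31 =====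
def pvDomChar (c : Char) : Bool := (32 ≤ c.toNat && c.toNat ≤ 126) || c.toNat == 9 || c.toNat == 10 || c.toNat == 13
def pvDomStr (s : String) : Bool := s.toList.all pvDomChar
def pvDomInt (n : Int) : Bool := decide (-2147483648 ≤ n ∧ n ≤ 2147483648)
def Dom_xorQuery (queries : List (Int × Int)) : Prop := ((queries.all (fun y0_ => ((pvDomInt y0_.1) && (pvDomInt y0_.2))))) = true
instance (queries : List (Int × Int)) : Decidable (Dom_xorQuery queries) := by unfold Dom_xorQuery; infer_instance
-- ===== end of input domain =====

-- B replaces A's forward pass + deferred final-XOR adjustment loop by a single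
-- backward index scan with a suffix-XOR accumulator (objective: alternative decomposition).

-- ===== PORT A =====
-- forward loop: state (ans, xor_val); then the second loop 'ans[i] ^= xor_val'
-- ports as mapping the final xor_val over the collected answers
def xorQuery (queries : List (Int × Int)) : List Int :=
  let s := queries.foldl
    (fun (s : List Int × Int) q =>
      if q.1 = 1 then (s.1 ++ [PySem.Int.bxor q.2 s.2], s.2) else (s.1, PySem.Int.bxor s.2 q.2))
    ([], 0)
  s.1.map (fun a => PySem.Int.bxor a s.2)

-- ===== PORT B =====
-- the while-loop 'i = len-1; while i >= 0: … ; i -= 1' ports as recursion on the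
-- fuel i+1; 'queries[i]' is always in range (0 ≤ i < len) so getD is exact there
def xorQueryLoop (qs : List (Int × Int)) : Nat → List Int → Int → List Int
  | 0, out, _ => out.reverse
  | Nat.succ i, out, n2 =>
      let q := qs.getD i (0, 0)
      if q.1 = 1 then xorQueryLoop qs i (out ++ [PySem.Int.bxor q.2 n2]) n2
      else xorQueryLoop qs i out (PySem.Int.bxor n2 q.2)

def xorQuery_alt (queries : List (Int × Int)) : List Int :=
  xorQueryLoop queries queries.length [] 0

-- ===== PRECONDITION & SPEC =====
def Spec_xorQuery (queries : List (Int × Int)) (out : List Int) : Prop := out = xorQuery_alt queries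
instance (queries : List (Int × Int)) (out : List Int) : Decidable (Spec_xorQuery queries out) := by unfold Spec_xorQuery; infer_instance

-- ===== CLAIM (what is proved, stated in full; the proofs are below) =====
def Claim_equal_xorQuery : Prop := ∀ (queries : List (Int × Int)), Dom_xorQuery queries → Spec_xorQuery queries (xorQuery queries)

-- ===== LEMMAS AND PROOFS =====

-- sign/magnitude encoding of an Int, used to derive associativity of bxor from Nat.xor
def pvNeg (a : Int) : Bool := decide (a < 0)
def pvEnc (a : Int) : Nat := if 0 ≤ a then a.toNat else (-a - 1).toNat
def pvDec (s : Bool) (n : Nat) : Int := if s then -(n : Int) - 1 else (n : Int)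

theorem pvBxor_eq (a b : Int) :
    PySem.Int.bxor a b = pvDec (xor (pvNeg a) (pvNeg b)) (pvEnc a ^^^ pvEnc b) := by
  unfold PySem.Int.bxor pvDec pvNeg pvEnc
  by_cases ha : 0 ≤ a <;> by_cases hb : 0 ≤ b <;> simp [ha, hb] <;> omega

theorem pvNeg_dec (s : Bool) (n : Nat) : pvNeg (pvDec s n) = s := by
  cases s <;> simp [pvNeg, pvDec] <;> omega

theorem pvEnc_dec (s : Bool) (n : Nat) : pvEnc (pvDec s n) = n := by
  cases s <;> simp [pvEnc, pvDec] <;> omega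

theorem pvBxor_assoc (a b c : Int) :
    PySem.Int.bxor (PySem.Int.bxor a b) c = PySem.Int.bxor a (PySem.Int.bxor b c) := by
  rw [pvBxor_eq a b, pvBxor_eq b c, pvBxor_eq _ c, pvBxor_eq a,
    pvNeg_dec, pvEnc_dec, pvNeg_dec, pvEnc_dec, Bool.xor_assoc, Nat.xor_assoc]

theorem pvXorAux (a b c : Int) :
    PySem.Int.bxor (PySem.Int.bxor a b) (PySem.Int.bxor b c) = PySem.Int.bxor a c := by
  rw [pvBxor_assoc, ← pvBxor_assoc b b c, PySem.Int.bxor_self,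
    PySem.Int.bxor_comm 0 c, PySem.Int.bxor_zero]

-- step function of A's fold (the inline lambda is definitionally this)
def pvStep (s : List Int × Int) (q : Int × Int) : List Int × Int :=
  if q.1 = 1 then (s.1 ++ [PySem.Int.bxor q.2 s.2], s.2) else (s.1, PySem.Int.bxor s.2 q.2)

theorem pvStep_pos (s : List Int × Int) (q : Int × Int) (h : q.1 = 1) :
    pvStep s q = (s.1 ++ [PySem.Int.bxor q.2 s.2], s.2) := by simp [pvStep, h]

theorem pvStep_neg (s : List Int × Int) (q : Int × Int) (h : ¬ q.1 = 1) :
    pvStep s q = (s.1, PySem.Int.bxor s.2 q.2) := by simp [pvStep, h]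

-- the backward scan as a foldr with a general initial accumulator
def pvBack (qs : List (Int × Int)) (x : Int) : List Int × Int :=
  qs.foldr (fun q s => pvStep s q) ([], x)

theorem pvBack_cons (q : Int × Int) (qs : List (Int × Int)) (x : Int) :
    pvBack (q :: qs) x = pvStep (pvBack qs x) q := rfl

-- foldr with a nonempty initial answer list only prefixes the answers
theorem pvBackPrefix (qs : List (Int × Int)) : ∀ (a : List Int) (x : Int),
    qs.foldr (fun q s => pvStep s q) (a, x) = (a ++ (pvBack qs x).1, (pvBack qs x).2) := by
  induction qs with
  | nil => intro a x; simp [pvBack]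
  | cons q qs ih =>
    intro a x
    rw [List.foldr_cons, ih a x, pvBack_cons]
    by_cases h : q.1 = 1
    · rw [pvStep_pos _ _ h, pvStep_pos _ _ h]; simp
    · rw [pvStep_neg _ _ h, pvStep_neg _ _ h]

-- accumulator of A's fold: already-collected answers are only prefixed
theorem pvPrefix (qs : List (Int × Int)) : ∀ (a : List Int) (x : Int),
    qs.foldl pvStep (a, x)
      = (a ++ (qs.foldl pvStep ([], x)).1, (qs.foldl pvStep ([], x)).2) := by
  induction qs with
  | nil => intro a x; simp
  | cons q qs ih =>
    intro a x
    rw [List.foldl_cons, List.foldl_cons]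
    by_cases h : q.1 = 1
    · rw [pvStep_pos _ _ h, pvStep_pos _ _ h]
      simp only [List.nil_append]
      rw [ih (a ++ [PySem.Int.bxor q.2 x]) x, ih [PySem.Int.bxor q.2 x] x]
      simp
    · rw [pvStep_neg _ _ h, pvStep_neg _ _ h]
      exact ih a (PySem.Int.bxor x q.2)

-- A's final xor_val = initial value XOR the backward scan's total accumulator
theorem pvSnd (qs : List (Int × Int)) : ∀ (x : Int),
    (qs.foldl pvStep ([], x)).2 = PySem.Int.bxor x (pvBack qs 0).2 := by
  induction qs with
  | nil => intro x; simp [pvBack, PySem.Int.bxor_zero]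
  | cons q qs ih =>
    intro x
    rw [List.foldl_cons, pvBack_cons]
    by_cases h : q.1 = 1
    · rw [pvStep_pos _ _ h, pvStep_pos _ _ h]
      simp only [List.nil_append]
      rw [pvPrefix qs [PySem.Int.bxor q.2 x] x]
      exact ih x
    · rw [pvStep_neg _ _ h, pvStep_neg _ _ h]
      show (qs.foldl pvStep ([], PySem.Int.bxor x q.2)).2
          = PySem.Int.bxor x (PySem.Int.bxor (pvBack qs 0).2 q.2)
      rw [ih (PySem.Int.bxor x q.2), pvBxor_assoc, PySem.Int.bxor_comm q.2 (pvBack qs 0).2]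

-- A's answers adjusted by the final xor_val = the backward scan's answers reversed
theorem pvMain (qs : List (Int × Int)) : ∀ (x : Int),
    (qs.foldl pvStep ([], x)).1.map (fun a => PySem.Int.bxor a (qs.foldl pvStep ([], x)).2)
      = (pvBack qs 0).1.reverse := by
  induction qs with
  | nil => intro x; simp [pvBack]
  | cons q qs ih =>
    intro x
    rw [List.foldl_cons, pvBack_cons]
    by_cases h : q.1 = 1
    · rw [pvStep_pos _ _ h, pvStep_pos _ _ h]
      simp only [List.nil_append]
      rw [pvPrefix qs [PySem.Int.bxor q.2 x] x]
      show (PySem.Int.bxor q.2 x :: (qs.foldl pvStep ([], x)).1).map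
            (fun a => PySem.Int.bxor a (qs.foldl pvStep ([], x)).2)
          = ((pvBack qs 0).1 ++ [PySem.Int.bxor q.2 (pvBack qs 0).2]).reverse
      rw [List.map_cons, List.reverse_append, List.reverse_singleton, List.singleton_append,
        ih x, pvSnd qs x, pvXorAux]
    · rw [pvStep_neg _ _ h, pvStep_neg _ _ h]
      exact ih (PySem.Int.bxor x q.2)

-- loop invariant of B: with fuel i ≤ len, the loop's result is out followed by
-- the backward scan of the first i queries, all reversed at exit
theorem pvLoop (qs : List (Int × Int)) : ∀ (i : Nat), i ≤ qs.length →
    ∀ (out : List Int) (n2 : Int),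
    xorQueryLoop qs i out n2 = (out ++ (pvBack (qs.take i) n2).1).reverse := by
  intro i
  induction i with
  | zero => intro _ out n2; simp [xorQueryLoop, pvBack]
  | succ i ih =>
    intro hle out n2
    have hi : i < qs.length := Nat.lt_of_succ_le hle
    have hget : qs.getD i (0, 0) = qs[i] := List.getD_eq_getElem qs (0, 0) hi
    have htake : qs.take (i + 1) = qs.take i ++ [qs[i]] := by
      rw [List.take_add_one]
      simp [List.getElem?_eq_getElem hi]
    have hback : pvBack (qs.take (i + 1)) n2
        = (qs.take i).foldr (fun q s => pvStep s q) (pvStep ([], n2) qs[i]) := by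
      rw [htake]; unfold pvBack; rw [List.foldr_append]; rfl
    show xorQueryLoop qs (i + 1) out n2 = _
    unfold xorQueryLoop
    simp only [hget]
    by_cases h : (qs[i] : Int × Int).1 = 1
    · rw [if_pos h, ih (Nat.le_of_lt hi), hback, pvStep_pos _ _ h]
      simp only [List.nil_append]
      rw [pvBackPrefix]
      simp [List.append_assoc]
    · rw [if_neg h, ih (Nat.le_of_lt hi), hback, pvStep_neg _ _ h]
      rfl

-- ===== VERDICT (by name: the statement is the Claim_ definition above) =====
theorem xorQuery_spec : Claim_equal_xorQuery := by
  intro qs _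
  show xorQuery qs = xorQuery_alt qs
  unfold xorQuery xorQuery_alt
  have hstep : (fun (s : List Int × Int) q =>
      if q.1 = 1 then (s.1 ++ [PySem.Int.bxor q.2 s.2], s.2) else (s.1, PySem.Int.bxor s.2 q.2))
      = pvStep := rfl
  rw [pvLoop qs qs.length (Nat.le_refl _) [] 0, List.take_length]
  simp only [hstep, List.nil_append]
  exact pvMain qs 0
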